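-- pv_equiv track=rewrite | github.com/mstathers/AdventOfCode | 2024/day09/day09.py | move_last_element_into_empty_spot
-- ===== SOURCE A (Python) =====
-- def move_last_element_into_empty_spot(disk: list):
--     # remove spaces
--     if disk[-1] == '.':
--         disk.pop()
--         return move_last_element_into_empty_spot(disk)
--
--     try:
--         empty_slot = disk.index('.')
--         disk[empty_slot] = disk.pop()
--         return move_last_element_into_empty_spot(disk)
--     except ValueError:
--         return disk
-- ===== SOURCE B (Python) =====
-- def move_last_element_into_empty_spot(disk: list):
--     # One pass: keep the first k slots (k = number of file blocks); each '.'
--     # among them is filled with the rightmost unused file block from the tail.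
--     k = sum(1 for x in disk if x != '.')
--     fillers = [x for x in disk[k:] if x != '.']
--     out = []
--     for x in disk[:k]:
--         out.append(x if x != '.' else fillers.pop())
--     return out
-- ===== Notes on version B (the rewrite author's own statement) =====
-- stated objective: alternative
-- what changed: A recursively rescans the list with list.index('.') and pops the last element, mutating the input; B computes the number k of file blocks once, collects the non-'.' blocks of the tail, and fills the first k slots in a single pass, popping fillers from the end.
import Mathlib
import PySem

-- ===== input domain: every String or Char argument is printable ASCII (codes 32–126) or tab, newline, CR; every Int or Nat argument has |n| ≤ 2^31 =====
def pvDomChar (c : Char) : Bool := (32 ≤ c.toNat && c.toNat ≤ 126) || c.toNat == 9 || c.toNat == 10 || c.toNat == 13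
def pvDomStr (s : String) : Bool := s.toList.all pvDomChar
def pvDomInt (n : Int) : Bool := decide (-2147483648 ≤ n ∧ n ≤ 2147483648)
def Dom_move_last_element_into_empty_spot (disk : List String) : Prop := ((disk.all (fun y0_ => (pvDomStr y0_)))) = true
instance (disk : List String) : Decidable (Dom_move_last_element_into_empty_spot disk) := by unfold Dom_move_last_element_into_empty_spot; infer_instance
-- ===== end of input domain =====

-- B replaces A's recursion (repeated list.index('.') + pop, mutating) by a
-- counting pass plus a single fill pass (objective: alternative). A mutates its
-- argument in place; B does not — the equivalence proved is about the RETURN value only.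

-- ===== PORT A =====
-- literal port of A's recursion: pop trailing '.', else move the popped last
-- element into the first '.' slot; recursion terminates since length decreases.
def move_last_element_into_empty_spot (disk : List String) : List String :=
  match hg : PySem.List.pyGet? disk (-1) with
  | none => []        -- disk[-1] raises IndexError on the empty list (outside Pre_)
  | some last =>
    if last == "." then
      move_last_element_into_empty_spot disk.dropLast
    else
      match PySem.List.index? disk "." with
      | some idx => move_last_element_into_empty_spot (disk.dropLast.set idx last)
      | none => disk
termination_by disk.length
decreasing_by
  · have hne : disk ≠ [] := by
      intro hnil; subst hnil; simp [PySem.List.pyGet?] at hg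
    have := List.length_pos_iff.mpr hne
    simp only [List.length_dropLast]; omega
  · have hne : disk ≠ [] := by
      intro hnil; subst hnil; simp [PySem.List.pyGet?] at hg
    have := List.length_pos_iff.mpr hne
    simp only [List.length_set, List.length_dropLast]; omega

-- ===== PORT B =====
-- step of B's fill loop: append x, or pop the last filler into the '.' slot
def pvFillStep (s : List String × List String) (x : String) : List String × List String :=
  if x ≠ "." then (s.1 ++ [x], s.2)
  else
    match PySem.List.pop? s.2 (-1) with   -- fillers.pop(); none is unreachable in B
    | some (y, rest) => (s.1 ++ [y], rest)
    | none => (s.1, s.2)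

def move_last_element_into_empty_spot_alt (disk : List String) : List String :=
  let k : Nat := disk.foldl (fun a x => if x ≠ "." then a + 1 else a) 0
  let fillers := (PySem.List.slice disk (some (k : Int)) none).filter (fun x => x ≠ ".")
  ((PySem.List.slice disk none (some (k : Int))).foldl pvFillStep ([], fillers)).1

-- ===== PRECONDITION & SPEC =====
-- Pre_ excludes exactly the inputs on which A raises IndexError: lists whose
-- elements are all "." (including the empty list), where disk.pop() eventually
-- empties the list and disk[-1] fails.
def Pre_move_last_element_into_empty_spot (disk : List String) : Prop :=
  ∃ x ∈ disk, x ≠ "."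
instance (disk : List String) : Decidable (Pre_move_last_element_into_empty_spot disk) := by
  unfold Pre_move_last_element_into_empty_spot; infer_instance

def pvWitness_move_last_element_into_empty_spot : List String := ["0", ".", "9"]

def Spec_move_last_element_into_empty_spot (disk : List String) (out : List String) : Prop :=
  out = move_last_element_into_empty_spot_alt disk
instance (disk : List String) (out : List String) : Decidable (Spec_move_last_element_into_empty_spot disk out) := by
  unfold Spec_move_last_element_into_empty_spot; infer_instance

-- ===== CLAIM (what is proved, stated in full; the proofs are below) =====
def Claim_equal_move_last_element_into_empty_spot : Prop := ∀ (disk : List String), Dom_move_last_element_into_empty_spot disk → Pre_move_last_element_into_empty_spot disk → Spec_move_last_element_into_empty_spot disk (move_last_element_into_empty_spot disk)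


-- ===== LEMMAS AND PROOFS =====

-- number of file blocks (non-"." entries)
def pvCnt (l : List String) : Nat := l.countP (fun x => x ≠ ".")

-- structural form of B's fill loop: consume the prefix, popping fillers from the end
def pvG : List String → List String → List String
  | [], _ => []
  | x :: xs, F =>
    if x ≠ "." then x :: pvG xs F
    else
      match PySem.List.pop? F (-1) with
      | some (y, rest) => y :: pvG xs rest
      | none => pvG xs F

-- the functional value both programs compute
def pvSpecFn (l : List String) : List String :=
  pvG (l.take (pvCnt l)) ((l.drop (pvCnt l)).filter (fun x => x ≠ "."))

theorem pvFoldl_fillStep (l : List String) (acc F : List String) :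
    (l.foldl pvFillStep (acc, F)).1 = acc ++ pvG l F := by
  induction l generalizing acc F with
  | nil => simp [pvG]
  | cons x xs ih =>
    by_cases hx : x = "."
    · subst hx
      simp only [List.foldl_cons, pvFillStep, pvG]
      cases hp : PySem.List.pop? F (-1) with
      | none => simpa using ih acc F
      | some p =>
        obtain ⟨y, rest⟩ := p
        simpa using ih (acc ++ [y]) rest
    · simp only [List.foldl_cons, pvFillStep, pvG, ne_eq, hx, not_false_iff]
      simpa using ih (acc ++ [x]) F

theorem pvCount_foldl (l : List String) (n : Nat) :
    l.foldl (fun a x => if x ≠ "." then a + 1 else a) n = n + pvCnt l := by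
  induction l generalizing n with
  | nil => simp [pvCnt]
  | cons x xs ih =>
    simp only [List.foldl_cons]
    by_cases hx : x = "."
    · rw [if_neg (by simp [hx]), ih]
      simp [pvCnt, hx]
    · rw [if_pos hx, ih]
      simp [pvCnt, hx]
      omega

theorem pvAlt_eq_specFn (l : List String) :
    move_last_element_into_empty_spot_alt l = pvSpecFn l := by
  unfold move_last_element_into_empty_spot_alt pvSpecFn
  simp only [pvCount_foldl, Nat.zero_add, PySem.List.slice_from_natCast,
    PySem.List.slice_to_natCast, pvFoldl_fillStep, List.nil_append]

theorem pvG_all_nondot (l F : List String) (h : ∀ x ∈ l, x ≠ ".") : pvG l F = l := by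
  induction l generalizing F with
  | nil => rfl
  | cons x xs ih =>
    have hx := h x (by simp)
    simp [pvG, hx, ih _ (fun y hy => h y (by simp [hy]))]

theorem pvG_append_nondot (p r F : List String) (h : ∀ x ∈ p, x ≠ ".") :
    pvG (p ++ r) F = p ++ pvG r F := by
  induction p with
  | nil => rfl
  | cons x xs ih =>
    have hx := h x (by simp)
    simp [pvG, hx, ih (fun y hy => h y (by simp [hy]))]

theorem pvCnt_nondot (l : List String) (h : ∀ x ∈ l, x ≠ ".") : pvCnt l = l.length := by
  rw [pvCnt, List.countP_eq_length]
  intro a ha; simp; exact h a ha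

theorem pvSpecFn_all_nondot (l : List String) (h : "." ∉ l) : pvSpecFn l = l := by
  have hnd : ∀ x ∈ l, x ≠ "." := fun x hx he => h (he ▸ hx)
  unfold pvSpecFn
  rw [pvCnt_nondot l hnd, List.take_length, List.drop_length]
  exact pvG_all_nondot l _ hnd

theorem pvSpecFn_drop_dot (init : List String) : pvSpecFn (init ++ ["."]) = pvSpecFn init := by
  unfold pvSpecFn
  have hk : pvCnt (init ++ ["."]) = pvCnt init := by simp [pvCnt]
  have hle : pvCnt init ≤ init.length := List.countP_le_length
  rw [hk, List.take_append_of_le_length hle, List.drop_append_of_le_length hle]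
  simp

theorem pvSpecFn_move (p s' : List String) (y : String) (hp : ∀ x ∈ p, x ≠ ".")
    (hy : y ≠ ".") : pvSpecFn (p ++ "." :: (s' ++ [y])) = pvSpecFn (p ++ y :: s') := by
  unfold pvSpecFn
  have hcp : List.countP (fun x => !decide (x = ".")) p = p.length := by
    simpa [pvCnt] using pvCnt_nondot p hp
  have hc : pvCnt s' ≤ s'.length := List.countP_le_length
  have hkl : pvCnt (p ++ "." :: (s' ++ [y])) = p.length + (1 + pvCnt s') := by
    simp [pvCnt, hy, hcp]; omega
  have hkm : pvCnt (p ++ y :: s') = p.length + (1 + pvCnt s') := by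
    simp [pvCnt, hy, hcp]; omega
  rw [hkl, hkm, List.take_length_add_append, List.take_length_add_append,
    List.drop_length_add_append, List.drop_length_add_append]
  simp only [List.take_succ_cons, List.drop_succ_cons,
    List.take_append_of_le_length hc, List.drop_append_of_le_length hc,
    List.filter_append, Nat.add_comm 1 (pvCnt s')]
  rw [pvG_append_nondot p _ _ hp, pvG_append_nondot p _ _ hp]
  simp [pvG, hy, PySem.List.pop?_last]

-- A equals the functional value, by strong induction on length following A's recursion
theorem pvA_eq_specFn (l : List String) (hp : ∃ x ∈ l, x ≠ ".") :
    move_last_element_into_empty_spot l = pvSpecFn l := by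
  obtain ⟨w, hw, hwne⟩ := hp
  rw [move_last_element_into_empty_spot.eq_def]
  split
  · rename_i h
    rw [PySem.List.pyGet?_neg_one, List.getLast?_eq_none_iff] at h
    subst h; simp at hw
  · rename_i last h
    rw [PySem.List.pyGet?_neg_one] at h
    obtain ⟨init, b, rfl⟩ : ∃ L b, l = L ++ [b] := by
      rcases List.eq_nil_or_concat l with rfl | ⟨L, b, rfl⟩
      · simp at hw
      · exact ⟨L, b, by simp [List.concat_eq_append]⟩
    have hb : b = last := by simpa using h
    subst hb
    by_cases hlast : b = "."
    · rw [if_pos (by simp [hlast])]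
      subst hlast
      have hw' : w ∈ init := by
        rcases List.mem_append.mp hw with h' | h'
        · exact h'
        · simp at h'; exact absurd h' hwne
      rw [List.dropLast_concat, pvA_eq_specFn init ⟨w, hw', hwne⟩, pvSpecFn_drop_dot]
    · rw [if_neg (by simp [hlast])]
      split
      · rename_i idx hidx
        rw [PySem.List.index?_eq_some_iff] at hidx
        obtain ⟨p, s, hls, hplen, hpnd⟩ := hidx
        have hpnd' : ∀ x ∈ p, x ≠ "." := fun x hx he => hpnd (he ▸ hx)
        obtain ⟨s', rfl⟩ : ∃ s', s = s' ++ [b] := by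
          rcases List.eq_nil_or_concat s with rfl | ⟨s2, b', rfl⟩
          · exfalso
            have h2 : (init ++ [b]).getLast? = some "." := by
              rw [hls]; exact List.getLast?_concat
            rw [h] at h2
            exact hlast (Option.some.inj h2)
          · simp only [List.concat_eq_append] at hls
            have h2 : (init ++ [b]).getLast? = some b' := by
              rw [hls, show p ++ "." :: (s2 ++ [b']) = (p ++ "." :: s2) ++ [b'] by simp]
              exact List.getLast?_concat
            rw [h] at h2
            exact ⟨s2, by simp [List.concat_eq_append, Option.some.inj h2]⟩
        have hls' : init = p ++ "." :: s' := by
          have h3 := congrArg List.dropLast hls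
          rw [List.dropLast_concat,
            show p ++ "." :: (s' ++ [b]) = (p ++ "." :: s') ++ [b] by simp,
            List.dropLast_concat] at h3
          exact h3
        rw [List.dropLast_concat, hls', ← hplen]
        have hset : (p ++ "." :: s').set p.length b = p ++ b :: s' := by simp
        rw [hset]
        have hlen : (p ++ b :: s').length < (init ++ [b]).length := by
          simp [hls']
        rw [pvA_eq_specFn (p ++ b :: s') ⟨b, by simp, hlast⟩]
        have hmv := (pvSpecFn_move p s' b hpnd' hlast).symm
        simpa using hmv
      · rename_i hidx
        rw [PySem.List.index?_eq_none_iff] at hidx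
        exact (pvSpecFn_all_nondot _ hidx).symm
termination_by l.length
decreasing_by
  all_goals simp_all [List.length_append]

-- ===== VERDICT (by name: the statement is the Claim_ definition above) =====
theorem move_last_element_into_empty_spot_spec : Claim_equal_move_last_element_into_empty_spot := by
  intro disk _ hpre
  unfold Spec_move_last_element_into_empty_spot
  rw [pvA_eq_specFn disk hpre, pvAlt_eq_specFn]
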